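-- pv_equiv track=rewrite | github.com/khadraAJ/Terminator | fonctions_terminator.py | findMeasurement
-- ===== SOURCE A (Python) =====
-- def findMeasurement(source):#, rgx):
--     src = source.split(" ") #Split de la phrase en liste de mots
--     resVal = ""
--     listProp = []
--     posEqual = 0
--     equalCpt = 0
--     for i, word in enumerate(src):
--         if word == '=':                             #if the word is "="
--             posEqual = i                            #I record its position in the word list
--             equalCpt = equalCpt + 1
-- #            reg = source.find(r)                   #After checking that the sentence contain a "=" I check that there is a numerous value (findRegex())
-- #            if reg != -1:                          # If there is a numerous values there is high chance that it's a measurement sentence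
--             for i, word in enumerate(src):
--                 if posEqual < i:                    #If the word is after the "="
--                     resVal = resVal + src[i] + " "  #I make sting of whatever is afeter the "" -> It is likely to be the values
--                 if posEqual > i:                    #For whatever is before the ="
--                     if src[i] != "":                #Sometime the function was returning me en empty element in the first place of the list. This allow to avoid it.
--                         listProp.append(src[i])     #I a list of word -> It is likely to be the properties
--     return(listProp, resVal, equalCpt)
-- ===== SOURCE B (Python) =====
-- def findMeasurement(source):
--     src = source.split(" ")
--     listProp = []
--     prefix = []
--     cnt = 0
--     for w in src:
--         if w == '=':
--             listProp += prefix
--             cnt += 1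
--         if w != '':
--             prefix.append(w)
--     resVal = ""
--     s = ""
--     for w in reversed(src):
--         if w == '=':
--             resVal = s + resVal
--         s = w + " " + s
--     return (listProp, resVal, cnt)
-- ===== Notes on version B (the rewrite author's own statement) =====
-- stated objective: alternative
-- what changed: A rescans the whole word list with index comparisons against posEqual each time it meets an equals-sign token; B makes two independent single passes with no index bookkeeping: a forward pass that snapshots a running accumulator of non-empty words into listProp at each equals-sign token, and a backward pass that builds resVal back-to-front by growing the suffix string one word at a time.
import Mathlib
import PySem

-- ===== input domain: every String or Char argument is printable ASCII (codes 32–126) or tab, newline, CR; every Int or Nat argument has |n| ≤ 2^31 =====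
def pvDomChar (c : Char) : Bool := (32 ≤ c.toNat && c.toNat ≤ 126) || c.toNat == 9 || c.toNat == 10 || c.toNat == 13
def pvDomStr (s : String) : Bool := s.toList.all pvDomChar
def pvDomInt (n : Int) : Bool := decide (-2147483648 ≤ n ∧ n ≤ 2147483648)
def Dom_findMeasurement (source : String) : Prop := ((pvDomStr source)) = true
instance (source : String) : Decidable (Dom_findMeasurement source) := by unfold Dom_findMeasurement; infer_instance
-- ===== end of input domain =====

-- B replaces A's nested per-equals-sign rescan of the whole word list by two independent single
-- passes: a forward pass that keeps a running accumulator of the non-empty words seen so far and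
-- snapshots it into listProp at each equals-sign token, and a backward pass that builds resVal
-- back-to-front while growing the suffix string one word at a time — an alternative decomposition.

-- ===== PORT A =====
-- outer state: (resVal, listProp, posEqual, equalCpt); inner state: (resVal, listProp)
def findMeasurement (source : String) : List String × String × Int :=
  let src := (PySem.Str.split? source " ").getD []
  let st := (PySem.List.enumerate src 0).foldl
    (fun (st : String × List String × Int × Int) iw =>
      if iw.2 = "=" then
        let posEqual := iw.1
        let equalCpt := st.2.2.2 + 1
        let inner := (PySem.List.enumerate src 0).foldl
          (fun (p : String × List String) jw =>
            (if posEqual < jw.1 then p.1 ++ PySem.List.pyGetD src jw.1 "" ++ " " else p.1,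
             if jw.1 < posEqual then
                (if PySem.List.pyGetD src jw.1 "" ≠ "" then p.2 ++ [PySem.List.pyGetD src jw.1 ""] else p.2)
              else p.2))
          (st.1, st.2.1)
        (inner.1, inner.2, posEqual, equalCpt)
      else st)
    ("", [], 0, 0)
  (st.2.1, st.1, st.2.2.2)

-- ===== PORT B =====
-- forward pass state: (listProp, prefix, cnt); backward pass state: (resVal, s)
def findMeasurement_alt (source : String) : List String × String × Int :=
  let src := (PySem.Str.split? source " ").getD []
  let st1 := src.foldl
    (fun (st : List String × List String × Int) w =>
      let st' := if w = "=" then (st.1 ++ st.2.1, st.2.1, st.2.2 + 1) else st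
      if w ≠ "" then (st'.1, st'.2.1 ++ [w], st'.2.2) else st')
    ([], [], 0)
  let st2 := src.reverse.foldl
    (fun (st : String × String) w =>
      (if w = "=" then st.2 ++ st.1 else st.1, w ++ " " ++ st.2))
    ("", "")
  (st1.1, st2.1, st1.2.2)

-- ===== PRECONDITION & SPEC =====
def Spec_findMeasurement (source : String) (out : List String × String × Int) : Prop := out = findMeasurement_alt source
instance (source : String) (out : List String × String × Int) : Decidable (Spec_findMeasurement source out) := by unfold Spec_findMeasurement; infer_instance

-- ===== CLAIM (what is proved, stated in full; the proofs are below) =====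
def Claim_equal_findMeasurement : Prop := ∀ (source : String), Dom_findMeasurement source → Spec_findMeasurement source (findMeasurement source)

-- ===== LEMMAS AND PROOFS =====

-- "".join-with-trailing-space of a word list, written recursively for the induction proofs
def pvJoinSp : List String → String
  | [] => ""
  | w :: ws => (w ++ " ") ++ pvJoinSp ws

-- for each '=' in the list, the accumulated non-empty-prefix snapshot, concatenated
def pvGProp (P : List String) : List String → List String
  | [] => []
  | w :: ws => (if w = "=" then P else []) ++ pvGProp (P ++ if w ≠ "" then [w] else []) ws

-- for each '=' in the list, the joined suffix after it, concatenated
def pvRVal : List String → String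
  | [] => ""
  | w :: ws => (if w = "=" then pvJoinSp ws else "") ++ pvRVal ws

-- number of '=' tokens
def pvCntEq : List String → Int
  | [] => 0
  | w :: ws => (if w = "=" then 1 else 0) + pvCntEq ws

theorem pvMem_enumerate {α : Type} (d : α) (xs : List α) (s : Int) (iw : Int × α)
    (h : iw ∈ PySem.List.enumerate xs s) :
    s ≤ iw.1 ∧ PySem.List.pyGetD xs (iw.1 - s) d = iw.2 := by
  induction xs generalizing s with
  | nil => simp [PySem.List.enumerate_nil] at h
  | cons x xs ih =>
    rw [PySem.List.enumerate_cons] at h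
    rcases List.mem_cons.mp h with h1 | h2
    · subst h1; simp [PySem.List.pyGetD_zero]
    · obtain ⟨hs, hg⟩ := ih (s + 1) h2
      refine ⟨by omega, ?_⟩
      have hk : iw.1 - s = (((iw.1 - s).toNat : Nat) : Int) := by omega
      rw [hk, PySem.List.pyGetD_natCast]
      have h1 : (iw.1 - s).toNat = (iw.1 - (s + 1)).toNat + 1 := by omega
      rw [h1, List.getD_cons_succ]
      have hk2 : iw.1 - (s + 1) = (((iw.1 - (s + 1)).toNat : Nat) : Int) := by omega
      rw [hk2, PySem.List.pyGetD_natCast] at hg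
      exact hg

-- A's inner loop over an enumerated list, with src[j] replaced by the enumerated word
theorem pvInner (xs : List String) (p s : Int) (r : String) (L : List String) :
    (PySem.List.enumerate xs s).foldl
      (fun (st : String × List String) jw =>
        (if p < jw.1 then st.1 ++ jw.2 ++ " " else st.1,
         if jw.1 < p then (if jw.2 ≠ "" then st.2 ++ [jw.2] else st.2) else st.2))
      (r, L)
    = (r ++ pvJoinSp (xs.drop (p + 1 - s).toNat),
       L ++ (xs.take (p - s).toNat).filter (fun w => decide (w ≠ ""))) := by
  induction xs generalizing s r L with
  | nil => simp [PySem.List.enumerate_nil, pvJoinSp]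
  | cons x xs ih =>
    rw [PySem.List.enumerate_cons, List.foldl_cons, ih (s + 1)]
    rcases lt_trichotomy p s with hc | hc | hc
    · have d1 : (p + 1 - s).toNat = 0 := by omega
      have d2 : (p + 1 - (s + 1)).toNat = 0 := by omega
      have d3 : (p - s).toNat = 0 := by omega
      have d4 : (p - (s + 1)).toNat = 0 := by omega
      rw [d1, d2, d3, d4]
      simp only [List.drop_zero, List.take_zero, List.filter_nil, List.append_nil]
      simp only [if_pos hc, if_neg (by omega : ¬ s < p), pvJoinSp]
      simp [String.append_assoc]
    · subst hc
      have d1 : (p + 1 - p).toNat = 1 := by omega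
      have d2 : (p + 1 - (p + 1)).toNat = 0 := by omega
      have d3 : (p - p).toNat = 0 := by omega
      have d4 : (p - (p + 1)).toNat = 0 := by omega
      rw [d1, d2, d3, d4]
      simp
    · have d1 : (p + 1 - s).toNat = (p + 1 - (s + 1)).toNat + 1 := by omega
      have d3 : (p - s).toNat = (p - (s + 1)).toNat + 1 := by omega
      rw [d1, d3]
      simp only [List.drop_succ_cons, List.take_succ_cons, List.filter_cons,
        if_neg (by omega : ¬ p < s), if_pos hc]
      by_cases hx : x = ""
      · subst hx; simp
      · simp [hx, List.append_assoc]

-- A's inner loop over src itself (src[j] is the enumerated word, by pvMem_enumerate)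
theorem pvInnerSrc (src : List String) (p : Int) (r : String) (L : List String) :
    (PySem.List.enumerate src 0).foldl
      (fun (st : String × List String) jw =>
        (if p < jw.1 then st.1 ++ PySem.List.pyGetD src jw.1 "" ++ " " else st.1,
         if jw.1 < p then
            (if PySem.List.pyGetD src jw.1 "" ≠ "" then st.2 ++ [PySem.List.pyGetD src jw.1 ""] else st.2)
          else st.2))
      (r, L)
    = (r ++ pvJoinSp (src.drop (p + 1).toNat),
       L ++ (src.take p.toNat).filter (fun w => decide (w ≠ ""))) := by
  rw [PySem.List.foldl_congr_mem _ _
    (fun (st : String × List String) jw =>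
        (if p < jw.1 then st.1 ++ jw.2 ++ " " else st.1,
         if jw.1 < p then (if jw.2 ≠ "" then st.2 ++ [jw.2] else st.2) else st.2)) _
    (by
      intro acc jw hmem
      have hg := (pvMem_enumerate "" src 0 jw hmem).2
      rw [sub_zero] at hg
      rw [hg])]
  rw [pvInner src p 0 r L]
  norm_num

-- A's outer loop, folded into three independent folds over the collected positions
theorem pvOuter (src : List String) (l : List (Int × String)) (r : String) (L : List String) (pe c : Int) :
    l.foldl
      (fun (st : String × List String × Int × Int) iw =>
        if iw.2 = "=" then
          (st.1 ++ pvJoinSp (src.drop (iw.1 + 1).toNat),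
           st.2.1 ++ (src.take iw.1.toNat).filter (fun w => decide (w ≠ "")),
           iw.1, st.2.2.2 + 1)
        else st)
      (r, L, pe, c)
    = ((l.filterMap (fun iw => if iw.2 = "=" then some iw.1 else none)).foldl
         (fun a p => a ++ pvJoinSp (src.drop (p + 1).toNat)) r,
       (l.filterMap (fun iw => if iw.2 = "=" then some iw.1 else none)).foldl
         (fun a p => a ++ (src.take p.toNat).filter (fun w => decide (w ≠ ""))) L,
       (l.filterMap (fun iw => if iw.2 = "=" then some iw.1 else none)).foldl (fun _ p => p) pe,
       c + ((l.filterMap (fun iw => if iw.2 = "=" then some iw.1 else none)).length : Int)) := by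
  induction l generalizing r L pe c with
  | nil => simp
  | cons iw l ih =>
    by_cases hw : iw.2 = "="
    · simp only [List.foldl_cons, List.filterMap_cons, hw]
      rw [ih]
      refine Prod.ext rfl (Prod.ext rfl (Prod.ext rfl ?_))
      push_cast [List.length_cons]
      ring
    · simp only [List.foldl_cons, List.filterMap_cons, hw, if_false]
      rw [ih]

-- A's listProp fold over the '='-positions equals the recursive snapshot function pvGProp
theorem pvA_prop (rest : List String) : ∀ (pre L : List String),
    ((PySem.List.enumerate rest ((pre.length : Nat) : Int)).filterMap
        (fun iw => if iw.2 = "=" then some iw.1 else none)).foldl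
      (fun a p => a ++ ((pre ++ rest).take p.toNat).filter (fun w => decide (w ≠ ""))) L
    = L ++ pvGProp (pre.filter (fun w => decide (w ≠ ""))) rest := by
  induction rest with
  | nil => intro pre L; simp [PySem.List.enumerate_nil, pvGProp]
  | cons w ws ih =>
    intro pre L
    rw [PySem.List.enumerate_cons]
    have hlen : ((pre.length : Nat) : Int) + 1 = (((pre ++ [w]).length : Nat) : Int) := by
      simp only [List.length_append, List.length_cons, List.length_nil]; push_cast; ring
    have happ : pre ++ w :: ws = (pre ++ [w]) ++ ws := by simp
    by_cases hw : w = "="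
    · subst hw
      rw [List.filterMap_cons]
      simp only [reduceIte, List.foldl_cons]
      have htake : ((pre ++ "=" :: ws).take (((pre.length : Nat) : Int)).toNat) = pre := by
        rw [Int.toNat_natCast, List.take_left]
      rw [htake, hlen, happ, ih (pre ++ ["="]) (L ++ pre.filter (fun w => decide (w ≠ "")))]
      simp [pvGProp, List.filter_append]
    · rw [List.filterMap_cons]
      simp only [hw, if_false]
      rw [hlen, happ, ih (pre ++ [w]) L]
      by_cases he : w = ""
      · subst he; simp [pvGProp, List.filter_append, hw]
      · simp [pvGProp, List.filter_append, hw, he]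

-- A's resVal fold over the '='-positions equals the recursive suffix function pvRVal
theorem pvA_val (rest : List String) : ∀ (pre : List String) (R : String),
    ((PySem.List.enumerate rest ((pre.length : Nat) : Int)).filterMap
        (fun iw => if iw.2 = "=" then some iw.1 else none)).foldl
      (fun a p => a ++ pvJoinSp ((pre ++ rest).drop (p + 1).toNat)) R
    = R ++ pvRVal rest := by
  induction rest with
  | nil => intro pre R; simp [PySem.List.enumerate_nil, pvRVal]
  | cons w ws ih =>
    intro pre R
    rw [PySem.List.enumerate_cons]
    have hlen : ((pre.length : Nat) : Int) + 1 = (((pre ++ [w]).length : Nat) : Int) := by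
      simp only [List.length_append, List.length_cons, List.length_nil]; push_cast; ring
    have happ : pre ++ w :: ws = (pre ++ [w]) ++ ws := by simp
    by_cases hw : w = "="
    · subst hw
      rw [List.filterMap_cons]
      simp only [reduceIte, List.foldl_cons]
      have hdrop : ((pre ++ "=" :: ws).drop ((((pre.length : Nat) : Int)) + 1).toNat) = ws := by
        rw [happ]
        have h2 : ((((pre.length : Nat) : Int)) + 1).toNat = (pre ++ ["="]).length := by
          simp [List.length_append]
        rw [h2, List.drop_left]
      rw [hdrop, hlen, happ, ih (pre ++ ["="]) (R ++ pvJoinSp ws)]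
      simp [pvRVal, String.append_assoc]
    · rw [List.filterMap_cons]
      simp only [hw, if_false]
      rw [hlen, happ, ih (pre ++ [w]) R]
      simp [pvRVal, hw]

-- the number of '='-positions equals pvCntEq
theorem pvA_cnt (rest : List String) : ∀ (s : Int),
    (((PySem.List.enumerate rest s).filterMap
        (fun iw => if iw.2 = "=" then some iw.1 else none)).length : Int)
    = pvCntEq rest := by
  induction rest with
  | nil => intro s; simp [PySem.List.enumerate_nil, pvCntEq]
  | cons w ws ih =>
    intro s
    rw [PySem.List.enumerate_cons, List.filterMap_cons]
    by_cases hw : w = "="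
    · subst hw
      simp only [reduceIte, List.length_cons, pvCntEq]
      push_cast
      rw [ih]
      ring
    · simp only [hw, if_false, pvCntEq]
      rw [ih]
      ring

-- B's forward pass: listProp = snapshots, prefix = non-empty filter, cnt = '='-count
theorem pvB_fwd (src : List String) : ∀ (L P : List String) (c : Int),
    src.foldl
      (fun (st : List String × List String × Int) w =>
        let st' := if w = "=" then (st.1 ++ st.2.1, st.2.1, st.2.2 + 1) else st
        if w ≠ "" then (st'.1, st'.2.1 ++ [w], st'.2.2) else st')
      (L, P, c)
    = (L ++ pvGProp P src, P ++ src.filter (fun w => decide (w ≠ "")), c + pvCntEq src) := by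
  induction src with
  | nil => intro L P c; simp [pvGProp, pvCntEq]
  | cons w ws ih =>
    intro L P c
    rw [List.foldl_cons]
    by_cases hw : w = "="
    · subst hw
      simp only [ne_eq, reduceIte]
      rw [ih]
      simp only [pvGProp, pvCntEq, ne_eq, reduceIte, List.filter_cons]
      refine Prod.ext (by simp) (Prod.ext (by simp) (by simp; omega))
    · by_cases he : w = ""
      · subst he
        simp only [ne_eq]
        rw [ih]
        simp [pvGProp, pvCntEq, hw]
      · simp only [if_neg hw, if_pos he]
        rw [ih]
        simp [pvGProp, pvCntEq, hw, he]

-- B's backward pass computes (pvRVal, pvJoinSp)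
theorem pvB_bwd (src : List String) :
    src.reverse.foldl
      (fun (st : String × String) w =>
        (if w = "=" then st.2 ++ st.1 else st.1, w ++ " " ++ st.2))
      ("", "")
    = (pvRVal src, pvJoinSp src) := by
  rw [List.foldl_reverse]
  induction src with
  | nil => simp [pvRVal, pvJoinSp]
  | cons w ws ih =>
    rw [List.foldr_cons, ih]
    by_cases hw : w = "="
    · subst hw; simp [pvRVal, pvJoinSp]
    · simp [pvRVal, pvJoinSp, hw, String.append_assoc]

-- ===== VERDICT (by name: the statement is the Claim_ definition above) =====
theorem findMeasurement_spec : Claim_equal_findMeasurement := by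
  intro source _
  unfold Spec_findMeasurement findMeasurement findMeasurement_alt
  simp only []
  simp only [pvInnerSrc]
  rw [pvOuter]
  rw [pvB_fwd, pvB_bwd]
  have hA1 := pvA_prop ((PySem.Str.split? source " ").getD []) [] []
  have hA2 := pvA_val ((PySem.Str.split? source " ").getD []) [] ""
  have hA3 := pvA_cnt ((PySem.Str.split? source " ").getD []) 0
  simp only [List.length_nil, Nat.cast_zero, List.nil_append, List.filter_nil] at hA1 hA2 hA3
  rw [hA1, hA2, hA3]
  simp
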